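-- pv_equiv track=rewrite | github.com/zhangtianlong-git/Railway-Vertical-Alignment | 1222.py | get_lines_indexes
-- ===== SOURCE A (Python) =====
-- def get_lines_indexes(x_label1):
--     list_of_line_index1 = []
--     temp_list = []
--     for i in range(len(x_label1)):
--         if x_label1[i] == 0 and i < len(x_label1)-1:
--             temp_list.append(i)
--         else:
--             if len(temp_list) > 1:
--                 list_of_line_index1.append(temp_list)
--             temp_list = []
--     return list_of_line_index1
-- ===== SOURCE B (Python) =====
-- def get_lines_indexes(x_label1):
--     n = len(x_label1)
--     qualifies = [x_label1[i] == 0 and i < n - 1 for i in range(n)]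
--     result = []
--     i = 0
--     while i < n:
--         if not qualifies[i]:
--             i += 1
--         else:
--             j = i
--             while j < n and qualifies[j]:
--                 j += 1
--             if j - i > 1:
--                 result.append(list(range(i, j)))
--             i = j
--     return result
-- ===== Notes on version B (the rewrite author's own statement) =====
-- stated objective: alternative
-- what changed: B first builds a boolean qualifying mask over all indices, then scans it extracting each maximal True run at once (materialised with range) instead of A's element-by-element temp-list accumulation and flush.
import Mathlib
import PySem

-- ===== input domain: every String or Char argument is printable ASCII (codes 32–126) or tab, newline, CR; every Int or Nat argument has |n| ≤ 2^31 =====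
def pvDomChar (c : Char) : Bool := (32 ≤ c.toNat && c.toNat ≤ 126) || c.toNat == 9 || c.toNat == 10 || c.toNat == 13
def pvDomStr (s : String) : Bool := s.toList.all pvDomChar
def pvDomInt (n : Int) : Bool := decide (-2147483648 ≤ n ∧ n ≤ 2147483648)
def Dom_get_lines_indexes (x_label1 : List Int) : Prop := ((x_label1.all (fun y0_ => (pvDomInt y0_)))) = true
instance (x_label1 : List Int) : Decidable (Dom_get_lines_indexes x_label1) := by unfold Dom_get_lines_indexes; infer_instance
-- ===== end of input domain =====

-- B builds a boolean qualifying mask over all indices and then extracts maximal True runs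
-- in one scan (alternative decomposition); A accumulates a temp index list and flushes it.


-- ===== PORT A =====
-- literal transliteration of A's loop: fold over range(len x) with state (result, temp_list)
def get_lines_indexes (x_label1 : List Int) : List (List Int) :=
  ((List.range x_label1.length).foldl
    (fun (st : List (List Int) × List Int) (i : Nat) =>
      if PySem.List.pyGet? x_label1 (Int.ofNat i) = some 0 ∧ (i : Int) < (x_label1.length : Int) - 1 then
        (st.1, st.2 ++ [(i : Int)])
      else
        (if st.2.length > 1 then st.1 ++ [st.2] else st.1, []))
    ([], [])).1

-- ===== PORT B =====
-- list(range(i, i+k)) materialised as a helper (used by the port and the proofs)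
def pvSeg (a : Int) (k : Nat) : List Int := (List.range k).map (fun j => a + (j : Int))

-- B's run-extraction scan over the qualifying mask, carrying the current index
def pvAltGo : List Bool → Int → List (List Int)
  | [], _ => []
  | false :: q, i => pvAltGo q (i + 1)
  | true :: q, i =>
      let k := (q.takeWhile (fun b => b)).length + 1
      let q' := q.dropWhile (fun b => b)
      let rest := pvAltGo q' (i + (k : Int))
      if k > 1 then pvSeg i k :: rest else rest
termination_by q _ => q.length
decreasing_by
  · simp
  · simp only [List.length_cons]
    exact Nat.lt_succ_of_le (List.length_dropWhile_le ..)

def get_lines_indexes_alt (x_label1 : List Int) : List (List Int) :=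
  pvAltGo ((List.range x_label1.length).map
    (fun i => decide (PySem.List.pyGet? x_label1 (Int.ofNat i) = some 0 ∧ (i : Int) < (x_label1.length : Int) - 1))) 0

-- ===== PRECONDITION & SPEC =====
def Spec_get_lines_indexes (x_label1 : List Int) (out : List (List Int)) : Prop := out = get_lines_indexes_alt x_label1
instance (x_label1 : List Int) (out : List (List Int)) : Decidable (Spec_get_lines_indexes x_label1 out) := by unfold Spec_get_lines_indexes; infer_instance

-- ===== CLAIM (what is proved, stated in full; the proofs are below) =====
def Claim_equal_get_lines_indexes : Prop := ∀ (x_label1 : List Int), Dom_get_lines_indexes x_label1 → Spec_get_lines_indexes x_label1 (get_lines_indexes x_label1)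

-- ===== LEMMAS AND PROOFS =====

-- A's fold, abstracted over the boolean mask
def pvFoldA : List Bool → (List (List Int) × List Int) → Int → List (List Int) × List Int
  | [], st, _ => st
  | b :: q, st, i =>
      pvFoldA q
        (if b then (st.1, st.2 ++ [i])
         else (if st.2.length > 1 then st.1 ++ [st.2] else st.1, []))
        (i + 1)

-- reference function: result of A's fold given a pending run of length t ending just before index i
def pvPend : Nat → Int → List Bool → List (List Int)
  | _, _, [] => []
  | t, i, (true :: q) => pvPend (t + 1) (i + 1) q
  | t, i, (false :: q) => (if t > 1 then [pvSeg (i - t) t] else []) ++ pvPend 0 (i + 1) q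

theorem pvSeg_zero (a : Int) : pvSeg a 0 = [] := rfl

theorem pvSeg_succ (a : Int) (k : Nat) : pvSeg a (k + 1) = pvSeg a k ++ [a + k] := by
  simp [pvSeg, List.range_succ]

theorem pvSeg_length (a : Int) (k : Nat) : (pvSeg a k).length = k := by
  simp [pvSeg]

-- bridge: A's range-foldl is pvFoldA on the mask
theorem pv_bridge (x : List Int) :
    ∀ (a k : Nat) (st : List (List Int) × List Int),
      (List.range' a k).foldl
        (fun (st : List (List Int) × List Int) (i : Nat) =>
          if PySem.List.pyGet? x (Int.ofNat i) = some 0 ∧ (i : Int) < (x.length : Int) - 1 then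
            (st.1, st.2 ++ [(i : Int)])
          else
            (if st.2.length > 1 then st.1 ++ [st.2] else st.1, []))
        st
      = pvFoldA ((List.range' a k).map
          (fun i => decide (PySem.List.pyGet? x (Int.ofNat i) = some 0 ∧ (i : Int) < (x.length : Int) - 1)))
          st (a : Int) := by
  intro a k
  induction k generalizing a with
  | zero => intro st; simp [pvFoldA]
  | succ k ih =>
      intro st
      rw [List.range'_succ]
      simp only [List.foldl_cons, List.map_cons, pvFoldA]
      rw [ih (a + 1)]
      by_cases h : PySem.List.pyGet? x (Int.ofNat a) = some 0 ∧ (a : Int) < (x.length : Int) - 1 <;>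
        simp [h] <;> congr 1 <;> push_cast <;> ring

-- main invariant for A's fold
theorem pvFoldA_pend :
    ∀ (q : List Bool) (t : Nat) (i : Int) (res : List (List Int)),
      (pvFoldA q (res, pvSeg (i - t) t) i).1 = res ++ pvPend t i q := by
  intro q
  induction q with
  | nil => intro t i res; simp [pvFoldA, pvPend]
  | cons b q ih =>
      intro t i res
      cases b with
      | true =>
          simp only [pvFoldA, pvPend, if_pos rfl]
          have h1 : pvSeg (i - t) t ++ [i] = pvSeg ((i + 1) - (t + 1)) (t + 1) := by
            rw [pvSeg_succ]
            have : (i + 1) - ((t : Int) + 1) = i - t := by ring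
            push_cast
            rw [this]
            congr 1
            congr 1
            ring
          simp only [h1]
          have := ih (t + 1) (i + 1) res
          push_cast at this ⊢
          exact this
      | false =>
          simp only [pvFoldA, pvPend, Bool.false_eq_true, if_false, pvSeg_length]
          have h0 : pvSeg ((i + 1) - (0 : Nat)) 0 = [] := rfl
          by_cases ht : t > 1
          · simp only [if_pos ht]
            rw [← h0, ih 0 (i + 1) (res ++ [pvSeg (i - t) t])]
            simp
          · simp only [if_neg ht]
            rw [← h0, ih 0 (i + 1) res]
            simp

-- pvPend skips over an all-true run by accumulating it
theorem pvPend_trues :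
    ∀ (run : List Bool), (∀ b ∈ run, b = true) →
      ∀ (t : Nat) (i : Int) (q : List Bool),
        pvPend t i (run ++ q) = pvPend (t + run.length) (i + run.length) q := by
  intro run
  induction run with
  | nil => intro _ t i q; simp
  | cons b rest ih =>
      intro h t i q
      have hb : b = true := h b (List.mem_cons_self ..)
      subst hb
      simp only [List.cons_append, pvPend]
      rw [ih (fun b hb => h b (List.mem_cons_of_mem _ hb))]
      congr 1 <;> simp only [List.length_cons] <;> push_cast <;> ring

-- the head of dropWhile id is false
theorem pv_dropWhile_head_false :
    ∀ (l : List Bool) (c : Bool) (cs : List Bool),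
      l.dropWhile (fun b => b) = c :: cs → c = false := by
  intro l
  induction l with
  | nil => intro c cs h; simp at h
  | cons b t ih =>
      intro c cs h
      cases b with
      | true => exact ih c cs (by simpa [List.dropWhile_cons] using h)
      | false => simp [List.dropWhile_cons] at h; exact h.1

-- B's scan equals pvPend 0, provided the mask does not end in true
theorem pvAltGo_eq_pend :
    ∀ (n : Nat) (q : List Bool), q.length ≤ n → q.getLast? ≠ some true →
      ∀ (i : Int), pvAltGo q i = pvPend 0 i q := by
  intro n
  induction n with
  | zero =>
      intro q hq _ i
      have : q = [] := List.eq_nil_of_length_eq_zero (Nat.le_zero.mp hq)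
      subst this; simp [pvAltGo, pvPend]
  | succ n ih =>
      intro q hq hlast i
      cases q with
      | nil => simp [pvAltGo, pvPend]
      | cons b rest =>
          cases b with
          | false =>
              rw [pvAltGo, pvPend]
              simp only [Nat.not_lt_zero, gt_iff_lt, Nat.lt_irrefl, if_false, List.nil_append]
              apply ih rest (by simpa using Nat.le_of_succ_le_succ hq)
              intro hr
              apply hlast
              cases rest with
              | nil => simp at hr
              | cons c cs => simpa [List.getLast?_cons_cons] using hr
          | true =>
              have hdec : rest = rest.takeWhile (fun b => b) ++ rest.dropWhile (fun b => b) :=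
                (List.takeWhile_append_dropWhile).symm
              have hruntrue : ∀ b ∈ rest.takeWhile (fun b => b), b = true := by
                intro b hb
                simpa using List.mem_takeWhile_imp hb
              have hq'ne : rest.dropWhile (fun b => b) ≠ [] := by
                intro hnil
                have hall : ∀ b ∈ rest, b = true := by
                  intro b hb
                  exact hruntrue b (by rw [← List.append_nil (rest.takeWhile _), ← hnil, ← hdec]; exact hb)
                apply hlast
                cases hrl : rest.getLast? with
                | none =>
                    have : rest = [] := by
                      cases rest with
                      | nil => rfl
                      | cons c cs => simp [List.getLast?_eq_some_getLast] at hrl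
                    simp [this]
                | some v =>
                    have hv : v = true := hall v (List.mem_of_mem_getLast? (by rw [hrl]; rfl))
                    cases rest with
                    | nil => simp at hrl
                    | cons c cs => rw [List.getLast?_cons_cons, hrl, hv]
              obtain ⟨c, q'', hc⟩ := List.exists_cons_of_ne_nil hq'ne
              have hcfalse : c = false := pv_dropWhile_head_false rest c q'' hc
              subst hcfalse
              rw [pvAltGo]
              have hlen : q''.length ≤ n := by
                have h1 : (rest.dropWhile (fun b => b)).length ≤ rest.length :=
                  List.length_dropWhile_le ..
                rw [hc] at h1
                simp only [List.length_cons] at h1 hq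
                omega
              have hlast'' : q''.getLast? ≠ some true := by
                intro hgl
                apply hlast
                have h2 : rest.getLast? = q''.getLast? := by
                  conv_lhs => rw [hdec, hc]
                  cases q'' with
                  | nil => simp at hgl
                  | cons e es => rw [List.getLast?_append_cons, List.getLast?_cons_cons]
                have hrne : rest ≠ [] := by
                  intro h
                  apply hq'ne
                  rw [h]; rfl
                obtain ⟨d, ds, hds⟩ := List.exists_cons_of_ne_nil hrne
                rw [hds, List.getLast?_cons_cons, ← hds, h2, hgl]
              have hih := ih q'' hlen hlast''
              have hr : pvPend 0 i (true :: rest) = pvPend 1 (i + 1) rest := rfl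
              rw [hr]
              conv_rhs => rw [hdec, hc]
              rw [pvPend_trues _ hruntrue 1 (i + 1), pvPend]
              have hkc : (1 : Nat) + (rest.takeWhile (fun b => b)).length
                  = (rest.takeWhile (fun b => b)).length + 1 := by omega
              have hic : i + 1 + ((rest.takeWhile (fun b => b)).length : Int)
                  = i + (((rest.takeWhile (fun b => b)).length + 1 : Nat) : Int) := by
                push_cast; ring
              rw [hkc, hic]
              have hfa : pvAltGo ((rest.dropWhile (fun b => b)))
                    (i + (((rest.takeWhile (fun b => b)).length + 1 : Nat) : Int))
                  = pvPend 0 (i + (((rest.takeWhile (fun b => b)).length + 1 : Nat) : Int) + 1) q'' := by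
                rw [hc, pvAltGo]
                exact hih _
              rw [hfa]
              have hseg : pvSeg (i + (((rest.takeWhile (fun b => b)).length + 1 : Nat) : Int)
                    - (((rest.takeWhile (fun b => b)).length + 1 : Nat) : Int))
                    ((rest.takeWhile (fun b => b)).length + 1) = pvSeg i ((rest.takeWhile (fun b => b)).length + 1) := by
                congr 1; push_cast; ring
              rw [hseg]
              by_cases hk1 : (rest.takeWhile (fun b => b)).length + 1 > 1 <;> simp [hk1]

-- the mask of a nonempty input never ends in true (the last index fails i < n-1)
theorem pv_mask_last (x : List Int) :
    (((List.range x.length).map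
      (fun i => decide (PySem.List.pyGet? x (Int.ofNat i) = some 0 ∧ (i : Int) < (x.length : Int) - 1))).getLast?)
      ≠ some true := by
  cases hx : x.length with
  | zero => simp [hx]
  | succ m =>
      rw [List.range_succ, List.map_append]
      rw [List.getLast?_append_of_ne_nil _ (by simp)]
      simp only [List.map_cons, List.map_nil, List.getLast?_singleton]
      intro h
      have := of_decide_eq_true (Option.some.inj h)
      have h2 := this.2
      push_cast at h2
      omega

-- ===== VERDICT (by name: the statement is the Claim_ definition above) =====
theorem get_lines_indexes_spec : Claim_equal_get_lines_indexes := by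
  intro x _
  show get_lines_indexes x = get_lines_indexes_alt x
  unfold get_lines_indexes get_lines_indexes_alt
  have hb := pv_bridge x 0 x.length ([], [])
  rw [← List.range_eq_range'] at hb
  rw [hb]
  have h1 : (pvFoldA ((List.range x.length).map
        (fun i => decide (PySem.List.pyGet? x (Int.ofNat i) = some 0 ∧ (i : Int) < (x.length : Int) - 1)))
        ([], []) (((0 : Nat) : Int))).1
      = pvPend 0 (((0 : Nat) : Int)) ((List.range x.length).map
        (fun i => decide (PySem.List.pyGet? x (Int.ofNat i) = some 0 ∧ (i : Int) < (x.length : Int) - 1))) := by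
    have h := pvFoldA_pend ((List.range x.length).map
        (fun i => decide (PySem.List.pyGet? x (Int.ofNat i) = some 0 ∧ (i : Int) < (x.length : Int) - 1)))
        0 (((0 : Nat) : Int)) []
    simpa [pvSeg_zero] using h
  rw [h1]
  rw [pvAltGo_eq_pend (((List.range x.length).map
      (fun i => decide (PySem.List.pyGet? x (Int.ofNat i) = some 0 ∧ (i : Int) < (x.length : Int) - 1))).length)
      _ le_rfl (pv_mask_last x) 0]
  norm_num
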